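-- pv_equiv track=rewrite | github.com/2wenty2wo/Rpi-USB-Cloner | rpi_usb_cloner/services/wifi.py | _nmcli_unescape
-- ===== SOURCE A (Python) =====
-- def _nmcli_unescape(value: str) -> str:
--     if not value:
--         return value
--     unescaped = []
--     index = 0
--     while index < len(value):
--         char = value[index]
--         if char == "\\" and index + 1 < len(value):
--             next_char = value[index + 1]
--             if next_char in {":", "|", "\\"}:
--                 unescaped.append(next_char)
--                 index += 2
--                 continue
--         unescaped.append(char)
--         index += 1
--     return "".join(unescaped)
-- ===== SOURCE B (Python) =====
-- import re
--
-- def _nmcli_unescape(value: str) -> str: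
--     if not value:
--         return value
--     return re.sub(r"\\([:|\\])", r"\1", value)
-- ===== Notes on version B (the rewrite author's own statement) =====
-- stated objective: idiomatic
-- what changed: Replaces the manual index-pointer while loop and list accumulator with a single re.sub over the pattern \\([:|\\]) whose non-overlapping left-to-right scan performs the unescaping in one C-level library call.
import Mathlib
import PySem

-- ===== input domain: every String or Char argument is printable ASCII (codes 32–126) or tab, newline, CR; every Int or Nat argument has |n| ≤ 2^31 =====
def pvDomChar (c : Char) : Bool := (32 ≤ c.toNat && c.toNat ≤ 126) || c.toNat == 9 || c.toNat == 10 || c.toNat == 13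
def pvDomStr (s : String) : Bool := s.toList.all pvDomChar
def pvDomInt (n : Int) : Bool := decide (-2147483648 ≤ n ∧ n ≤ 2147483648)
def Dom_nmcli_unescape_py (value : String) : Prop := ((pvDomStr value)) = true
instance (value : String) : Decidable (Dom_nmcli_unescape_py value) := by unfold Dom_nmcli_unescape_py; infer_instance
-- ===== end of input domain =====

-- B replaces A's manual index-pointer loop with one re.sub(r"\\([:|\\])", r"\1", value) call (idiomatic; same cost).


-- ===== PORT A =====
-- the while loop: index-pointer over the characters, appending to `unescaped`
-- (value[index] / value[index+1] are read only under the guards index < len / index+1 < len,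
-- so getD is exact here)
def nmcliLoopA (cs : List Char) (index : Nat) (unescaped : List Char) : List Char :=
  if index < cs.length then
    let char := cs.getD index ' '
    if char = '\\' ∧ index + 1 < cs.length then
      let next_char := cs.getD (index + 1) ' '
      if next_char = ':' ∨ next_char = '|' ∨ next_char = '\\' then
        nmcliLoopA cs (index + 2) (unescaped ++ [next_char])
      else
        nmcliLoopA cs (index + 1) (unescaped ++ [char])
    else
      nmcliLoopA cs (index + 1) (unescaped ++ [char])
  else
    unescaped
  termination_by cs.length - index
  decreasing_by all_goals omega

def nmcli_unescape_py (value : String) : String :=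
  if value = "" then value
  else String.ofList (nmcliLoopA value.toList 0 [])

-- ===== PORT B =====
-- hand port of re.sub(r"\\([:|\\])", r"\1", value): the regex engine's non-overlapping
-- left-to-right scan — at each position, if '\' followed by one of ':' '|' '\' matches,
-- emit the captured char and resume AFTER the match, else emit the char and advance one.
-- Exact for this pattern (single two-char alternative, no ambiguity).
def nmcliSubB : List Char → List Char
  | [] => []
  | [ch] => [ch]
  | ch :: c :: rest' =>
    if ch = '\\' ∧ (c = ':' ∨ c = '|' ∨ c = '\\') then c :: nmcliSubB rest'
    else ch :: nmcliSubB (c :: rest')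
  termination_by xs => xs.length
  decreasing_by all_goals (simp; try omega)

def nmcli_unescape_py_alt (value : String) : String :=
  if value = "" then value
  else String.ofList (nmcliSubB value.toList)

-- ===== PRECONDITION & SPEC =====
def Spec_nmcli_unescape_py (value : String) (out : String) : Prop := out = nmcli_unescape_py_alt value
instance (value : String) (out : String) : Decidable (Spec_nmcli_unescape_py value out) := by unfold Spec_nmcli_unescape_py; infer_instance

-- ===== CLAIM (what is proved, stated in full; the proofs are below) =====
def Claim_equal_nmcli_unescape_py : Prop := ∀ (value : String), Dom_nmcli_unescape_py value → Spec_nmcli_unescape_py value (nmcli_unescape_py value)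

-- ===== LEMMAS AND PROOFS =====

-- one-step equations for B's scan
theorem nmcliSubB_nil : nmcliSubB [] = [] := by rw [nmcliSubB]

theorem nmcliSubB_single (ch : Char) : nmcliSubB [ch] = [ch] := by rw [nmcliSubB]

theorem nmcliSubB_cons2 (ch c : Char) (rest' : List Char) :
    nmcliSubB (ch :: c :: rest') =
      if ch = '\\' ∧ (c = ':' ∨ c = '|' ∨ c = '\\') then c :: nmcliSubB rest'
      else ch :: nmcliSubB (c :: rest') := by rw [nmcliSubB]

-- pulling a leading char out of B's scan when it is not an escape trigger
theorem nmcliSubB_cons_of_ne (ch : Char) (rest : List Char) (h : ch ≠ '\\') :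
    nmcliSubB (ch :: rest) = ch :: nmcliSubB rest := by
  cases rest with
  | nil => rw [nmcliSubB_single, nmcliSubB_nil]
  | cons b r => rw [nmcliSubB_cons2]; simp [h]

-- A's pointer loop from position `index` equals the accumulator so far followed by
-- B's scan of the remaining suffix.
theorem nmcliLoopA_eq_sub (cs : List Char) (index : Nat) (acc : List Char) :
    nmcliLoopA cs index acc = acc ++ nmcliSubB (cs.drop index) := by
  induction hfuel : cs.length - index using Nat.strong_induction_on generalizing index acc with
  | _ fuel ih =>
    by_cases hlt : index < cs.length
    · have hdrop : cs.drop index = cs[index] :: cs.drop (index + 1) :=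
        List.drop_eq_getElem_cons hlt
      have hget : cs.getD index ' ' = cs[index] := List.getD_eq_getElem cs ' ' hlt
      rw [nmcliLoopA]
      simp only [hlt, if_true, hget]
      by_cases hbs : cs[index] = '\\' ∧ index + 1 < cs.length
      · obtain ⟨hch, hlt2⟩ := hbs
        have hdrop2 : cs.drop (index + 1) = cs[index + 1] :: cs.drop (index + 2) :=
          List.drop_eq_getElem_cons hlt2
        have hget2 : cs.getD (index + 1) ' ' = cs[index + 1] := List.getD_eq_getElem cs ' ' hlt2
        simp only [hch, hlt2, and_true, if_true, hget2]
        rw [hdrop, hdrop2, nmcliSubB_cons2]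
        by_cases hset : cs[index + 1] = ':' ∨ cs[index + 1] = '|' ∨ cs[index + 1] = '\\'
        · rw [if_pos hset, ih (cs.length - (index + 2)) (by omega) (index + 2) _ rfl]
          simp [hch, hset]
        · rw [if_neg hset, ih (cs.length - (index + 1)) (by omega) (index + 1) _ rfl,
            hdrop2]
          simp [hch, fun h => hset h]
      · rw [if_neg hbs, ih (cs.length - (index + 1)) (by omega) (index + 1) _ rfl, hdrop]
        rcases Decidable.em (cs[index] = '\\') with hch | hch
        · -- backslash but index+1 is out of range: it is the last character
          have hend : ¬ index + 1 < cs.length := fun h => hbs ⟨hch, h⟩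
          have hnil : cs.drop (index + 1) = [] := List.drop_eq_nil_of_le (by omega)
          rw [hnil, nmcliSubB_single, nmcliSubB_nil]
          simp
        · rw [nmcliSubB_cons_of_ne _ _ hch]
          simp
    · rw [nmcliLoopA]
      simp only [hlt, if_false]
      rw [List.drop_eq_nil_of_le (by omega), nmcliSubB_nil, List.append_nil]

-- ===== VERDICT (by name: the statement is the Claim_ definition above) =====
theorem nmcli_unescape_py_spec : Claim_equal_nmcli_unescape_py := by
  intro value _
  unfold Spec_nmcli_unescape_py nmcli_unescape_py nmcli_unescape_py_alt
  by_cases h : value = ""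
  · simp [h]
  · simp only [h, if_false]
    rw [nmcliLoopA_eq_sub, List.drop_zero, List.nil_append]
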